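-- pv_equiv track=rewrite | github.com/ycz011031/ECE-420-Final | Python Build/Library.py | trim_leading_trailing
-- ===== SOURCE A (Python) =====
-- def trim_leading_trailing(map_array):
--     segments = []
--     cur_segments = []
--     start = 0
--     start_flag = 0
--     for i in range(len(map_array)):
--         if (map_array[i] != 0) & (start_flag == 0):
--             start = i
--             start_flag = 1
--         else:
--             if (start_flag == 1):
--                 break
--
--     end = 0
--     end_flag = 0
--     for j in range(len(map_array)):
--         itr = len(map_array) - j - 1
--         if (map_array[itr] != 0) & (end_flag == 0):
--             end = itr
--             end_flag = 1
--         else: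
--             if (end_flag ==1):
--                 break
--
--     for k in range(len(map_array)):
--         if (k >= start) & (k <= end):
--             cur_segments.append(k)
--
--     segments.append(cur_segments)
--
--     return segments
-- ===== SOURCE B (Python) =====
-- def trim_leading_trailing(map_array):
--     nz = [i for i, v in enumerate(map_array) if v != 0]
--     start = nz[0] if nz else 0
--     end = nz[-1] if nz else 0
--     return [[k for k in range(len(map_array)) if start <= k <= end]]
-- ===== Notes on version B (the rewrite author's own statement) =====
-- stated objective: simpler
-- what changed: Replaces A's two directional early-break flag scans (forward and backward) with a single comprehension collecting all nonzero indices, taking its first and last elements as the endpoints, then filtering range(len) between them.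
import Mathlib
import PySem

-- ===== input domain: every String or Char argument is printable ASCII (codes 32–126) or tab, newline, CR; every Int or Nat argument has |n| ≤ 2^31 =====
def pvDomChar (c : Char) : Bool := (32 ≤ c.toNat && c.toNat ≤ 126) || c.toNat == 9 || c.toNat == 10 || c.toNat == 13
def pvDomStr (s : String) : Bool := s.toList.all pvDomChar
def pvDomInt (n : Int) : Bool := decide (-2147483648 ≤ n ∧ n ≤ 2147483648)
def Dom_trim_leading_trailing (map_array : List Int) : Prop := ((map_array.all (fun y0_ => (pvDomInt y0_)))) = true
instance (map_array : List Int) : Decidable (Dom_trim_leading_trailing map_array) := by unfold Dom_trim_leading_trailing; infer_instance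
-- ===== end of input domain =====

-- B replaces A's two directional early-break flag scans with one nonzero-index collection
-- plus first/last endpoint lookups (objective: simpler).

-- ===== PORT A =====
-- first loop: 'for i in range(len(map_array)): if (map_array[i] != 0) & (start_flag == 0): start = i; start_flag = 1; else: if start_flag == 1: break'
def pvAFirst (m : List Int) : List Int → Int → Int → Int
  | [], start, _ => start
  | i :: rest, start, flag =>
    if PySem.List.pyGetD m i 0 ≠ 0 ∧ flag = 0 then pvAFirst m rest i 1
    else if flag = 1 then start
    else pvAFirst m rest start flag

-- second loop: 'itr = len(map_array) - j - 1; if (map_array[itr] != 0) & (end_flag == 0): end = itr; end_flag = 1; else: if end_flag == 1: break'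
def pvAEnd (m : List Int) : List Int → Int → Int → Int
  | [], e, _ => e
  | j :: rest, e, flag =>
    let itr := (m.length : Int) - j - 1
    if PySem.List.pyGetD m itr 0 ≠ 0 ∧ flag = 0 then pvAEnd m rest itr 1
    else if flag = 1 then e
    else pvAEnd m rest e flag

def trim_leading_trailing (map_array : List Int) : List (List Int) :=
  let start := pvAFirst map_array (PySem.List.pyRange 0 (map_array.length : Int) 1) 0 0
  let e := pvAEnd map_array (PySem.List.pyRange 0 (map_array.length : Int) 1) 0 0
  -- third loop: 'for k in range(len(map_array)): if (k >= start) & (k <= end): cur_segments.append(k)'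
  let cur := (PySem.List.pyRange 0 (map_array.length : Int) 1).foldl
    (fun acc k => if k ≥ start ∧ k ≤ e then acc ++ [k] else acc) []
  [cur]

-- ===== PORT B =====
def trim_leading_trailing_alt (map_array : List Int) : List (List Int) :=
  -- nz = [i for i, v in enumerate(map_array) if v != 0]
  let nz := ((PySem.List.enumerate map_array 0).filter (fun p => p.2 ≠ 0)).map (·.1)
  let start := nz.head?.getD 0        -- nz[0] if nz else 0
  let e := nz.getLast?.getD 0         -- nz[-1] if nz else 0
  [(PySem.List.pyRange 0 (map_array.length : Int) 1).filter (fun k => decide (start ≤ k ∧ k ≤ e))]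

-- ===== PRECONDITION & SPEC =====
def Spec_trim_leading_trailing (map_array : List Int) (out : List (List Int)) : Prop := out = trim_leading_trailing_alt map_array
instance (map_array : List Int) (out : List (List Int)) : Decidable (Spec_trim_leading_trailing map_array out) := by unfold Spec_trim_leading_trailing; infer_instance

-- ===== CLAIM (what is proved, stated in full; the proofs are below) =====
def Claim_equal_trim_leading_trailing : Prop := ∀ (map_array : List Int), Dom_trim_leading_trailing map_array → Spec_trim_leading_trailing map_array (trim_leading_trailing map_array)

-- ===== LEMMAS AND PROOFS =====

-- once the flag is 1, A's loops return their accumulator unchanged (the break)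
theorem pvAFirst_flag_one (m : List Int) (idxs : List Int) (s : Int) :
    pvAFirst m idxs s 1 = s := by
  cases idxs with
  | nil => rfl
  | cons i rest => simp [pvAFirst]

theorem pvAEnd_flag_one (m : List Int) (idxs : List Int) (e : Int) :
    pvAEnd m idxs e 1 = e := by
  cases idxs with
  | nil => rfl
  | cons j rest => simp [pvAEnd]

-- A's first loop is find? over the index list
theorem pvAFirst_eq_find (m : List Int) (idxs : List Int) (s : Int) :
    pvAFirst m idxs s 0 =
      ((idxs.find? (fun i => decide (PySem.List.pyGetD m i 0 ≠ 0))).getD s) := by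
  induction idxs generalizing s with
  | nil => rfl
  | cons i rest ih =>
    by_cases h : PySem.List.pyGetD m i 0 ≠ 0
    · simp [pvAFirst, h, List.find?, pvAFirst_flag_one]
    · simp [pvAFirst, h, List.find?, ih]

-- A's second loop is find? over the transformed index list
theorem pvAEnd_eq_find (m : List Int) (idxs : List Int) (e : Int) :
    pvAEnd m idxs e 0 =
      (((idxs.map (fun j => (m.length : Int) - j - 1)).find?
          (fun i => decide (PySem.List.pyGetD m i 0 ≠ 0))).getD e) := by
  induction idxs generalizing e with
  | nil => rfl
  | cons j rest ih =>
    by_cases h : PySem.List.pyGetD m ((m.length : Int) - j - 1) 0 ≠ 0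
    · simp [pvAEnd, h, pvAEnd_flag_one]
    · simp [pvAEnd, h, ih]

-- the second loop's index sequence is the reversed range
theorem pvA_end_indices (n : Int) :
    (PySem.List.pyRange 0 n 1).map (fun j => n - j - 1) = (PySem.List.pyRange 0 n 1).reverse := by
  calc (PySem.List.pyRange 0 n 1).map (fun j => n - j - 1)
      = PySem.List.pyRange (n-1) (-1) (-1) := by
        rw [PySem.List.pyRange_neg_one, PySem.List.pyRange_one]
        simp [List.map_map, Function.comp_def]
        intro a _; ring
    _ = (PySem.List.pyRange 0 n 1).reverse := by
        have h := PySem.List.pyRange_neg_one_eq_reverse (n-1) (-1)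
        simpa using h

-- B's nonzero-index list is the filtered range
theorem pv_nz_eq (m : List Int) :
    ((PySem.List.enumerate m 0).filter (fun p => p.2 ≠ 0)).map (·.1) =
      (PySem.List.pyRange 0 (m.length : Int) 1).filter
        (fun i => decide (PySem.List.pyGetD m i 0 ≠ 0)) := by
  rw [PySem.List.enumerate_eq_map_pyRange m (0 : Int)]
  rw [List.filter_map, List.map_map]
  simp [Function.comp_def, PySem.List.len_eq]

-- ===== VERDICT (by name: the statement is the Claim_ definition above) =====
theorem trim_leading_trailing_spec : Claim_equal_trim_leading_trailing := by
  intro m _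
  show _ = _
  unfold trim_leading_trailing trim_leading_trailing_alt
  dsimp only
  rw [pv_nz_eq, pvAFirst_eq_find, pvAEnd_eq_find, pvA_end_indices]
  rw [List.head?_filter, List.getLast?_filter]
  rw [PySem.List.foldl_append_ite_eq_filter]
  simp [ge_iff_le]
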